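-- pv_equiv track=rewrite | github.com/jeongYuri/coding-test-solution | 백준/Silver/16401. 과자 나눠주기/과자 나눠주기.py | snack_length
-- ===== SOURCE A (Python) =====
-- def snack_length(m, snack):
--     start, end = 1,max(snack)
--     res = 0
--     while start<=end:
--         mid = (start+end)//2
--         total = sum(s//mid for s in snack)
--         if total>=m:
--             res = mid
--             start = mid+1
--         else:
--             end = mid-1
--     return res
-- ===== SOURCE B (Python) =====
-- def snack_length(m, snack):
--     L = max(snack)
--     while L >= 1:
--         if sum(s // L for s in snack) >= m:
--             return L
--         # jump straight to the next L at which some term s // L changes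
--         L = max(s // (s // L + 1) for s in snack)
--     return 0
-- ===== Notes on version B (the rewrite author's own statement) =====
-- stated objective: alternative
-- what changed: Replaces the binary search over [1, max(snack)] with a descending divisor-block skip scan: starting at max(snack), it returns the first L with sum(s//L) >= m, otherwise jumps L directly to max(s // (s//L + 1)), the largest smaller L at which any term s//L changes; no search interval or midpoints are maintained.
-- outside the precondition, e.g. on snack_length(-3, [-6, 2]): A returns 0, B returns 2; on snack_length(1, []): A raises ValueError, B raises ValueError
import Mathlib
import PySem

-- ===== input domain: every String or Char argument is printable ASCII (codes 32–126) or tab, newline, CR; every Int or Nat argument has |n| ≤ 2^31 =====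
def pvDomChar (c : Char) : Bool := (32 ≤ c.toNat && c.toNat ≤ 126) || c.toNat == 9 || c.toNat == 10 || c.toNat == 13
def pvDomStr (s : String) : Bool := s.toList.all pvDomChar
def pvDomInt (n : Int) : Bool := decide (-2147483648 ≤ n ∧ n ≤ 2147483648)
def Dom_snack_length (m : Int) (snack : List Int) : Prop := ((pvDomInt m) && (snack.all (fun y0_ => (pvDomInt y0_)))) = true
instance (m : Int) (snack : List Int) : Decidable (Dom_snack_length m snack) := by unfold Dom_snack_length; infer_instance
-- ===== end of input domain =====

-- B replaces A's binary search by a descending divisor-block skip scan (jump L to the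
-- next point where some s//L changes) — objective: alternative; not claimed faster.


-- ===== PORT A =====
-- total = sum(s//mid for s in snack)
def snackTotal (snack : List Int) (mid : Int) : Int :=
  (snack.map (fun s => PySem.Int.floordiv s mid)).sum

-- the while-loop of A, state (start, end, res)
def snackGoA (m : Int) (snack : List Int) (start stop res : Int) : Int :=
  if h : start ≤ stop then
    let mid := PySem.Int.floordiv (start + stop) 2
    if snackTotal snack mid ≥ m then
      snackGoA m snack (mid + 1) stop mid
    else
      snackGoA m snack start (mid - 1) res
  else res
termination_by (stop - start + 1).toNat
decreasing_by
  · have := PySem.Int.floordiv_two_mid_bounds (lo := start) (hi := stop) h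
    omega
  · have := PySem.Int.floordiv_two_mid_bounds (lo := start) (hi := stop) h
    omega

def snack_length (m : Int) (snack : List Int) : Int :=
  match PySem.List.max? snack (fun y => y) with
  | none => 0          -- Python: max([]) raises ValueError; excluded by Pre_
  | some mx => snackGoA m snack 1 mx 0

-- ===== PORT B =====
-- L = max(s // (s // L + 1) for s in snack)  (the jump target of B's loop)
def snackNext (snack : List Int) (L : Int) : Int :=
  match PySem.List.max?
      (snack.map (fun s => PySem.Int.floordiv s (PySem.Int.floordiv s L + 1)))
      (fun y => y) with
  | none => 0          -- unreachable: only called with snack ≠ [] (max(snack) succeeded)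
  | some v => v

-- B's loop: while L >= 1: if sum(s//L) >= m: return L; L = snackNext
-- ('next < L' is a pure termination guard: it is proved below for every call B makes)
def snackSkip (m : Int) (snack : List Int) (L : Int) : Int :=
  if h : L ≥ 1 then
    if (snack.map (fun s => PySem.Int.floordiv s L)).sum ≥ m then L
    else
      if h2 : snackNext snack L < L then snackSkip m snack (snackNext snack L) else 0
  else 0
termination_by L.toNat
decreasing_by omega

def snack_length_alt (m : Int) (snack : List Int) : Int :=
  match PySem.List.max? snack (fun y => y) with
  | none => 0          -- Python: max([]) raises ValueError; excluded by Pre_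
  | some mx => snackSkip m snack mx

-- ===== PRECONDITION & SPEC =====
-- Pre_ excludes the empty list, on which A (and B) raises ValueError (max([])), and
-- mixed-sign lists (a negative next to a positive snack length), which lie outside the
-- problem's natural domain and make the count sum(s//L) non-monotone in L, so A's binary
-- search lands on an accidental feasible point rather than any specified value.
def Pre_snack_length (m : Int) (snack : List Int) : Prop :=
  snack ≠ [] ∧ ((∀ s ∈ snack, 0 ≤ s) ∨ (∀ s ∈ snack, s ≤ 0))
instance (m : Int) (snack : List Int) : Decidable (Pre_snack_length m snack) := by
  unfold Pre_snack_length; infer_instance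

def pvWitness_snack_length : Int × List Int := (3, [10, 5, 7])

def Spec_snack_length (m : Int) (snack : List Int) (out : Int) : Prop := out = snack_length_alt m snack
instance (m : Int) (snack : List Int) (out : Int) : Decidable (Spec_snack_length m snack out) := by unfold Spec_snack_length; infer_instance

-- ===== CLAIM (what is proved, stated in full; the proofs are below) =====
def Claim_equal_snack_length : Prop := ∀ (m : Int) (snack : List Int), Dom_snack_length m snack → Pre_snack_length m snack → Spec_snack_length m snack (snack_length m snack)

-- ===== LEMMAS AND PROOFS =====

-- floor division of a nonneg dividend by a larger positive divisor gives a smaller quotient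
theorem snackFdivAntitone (s a b : Int) (hs : 0 ≤ s) (ha : 1 ≤ a) (hab : a ≤ b) :
    PySem.Int.floordiv s b ≤ PySem.Int.floordiv s a := by
  have hq0 : 0 ≤ PySem.Int.floordiv s b := by
    rw [PySem.Int.le_floordiv_iff_mul_le (by omega)]; simpa using hs
  have hqb : PySem.Int.floordiv s b * b ≤ s :=
    (PySem.Int.le_floordiv_iff_mul_le (a := s) (b := b)
      (q := PySem.Int.floordiv s b) (by omega)).mp le_rfl
  rw [PySem.Int.le_floordiv_iff_mul_le (by omega)]
  nlinarith

theorem snackTotalAntitone (snack : List Int) (hpos : ∀ s ∈ snack, 0 ≤ s)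
    (a b : Int) (ha : 1 ≤ a) (hab : a ≤ b) :
    snackTotal snack b ≤ snackTotal snack a := by
  induction snack with
  | nil => simp [snackTotal]
  | cons x t ih =>
    have hx := hpos x (by simp)
    have ht := ih (fun s hs => hpos s (by simp [hs]))
    simp only [snackTotal, List.map_cons, List.sum_cons] at *
    have := snackFdivAntitone x a b hx ha hab
    omega

-- per-element jump target: s // (s//L + 1) < L  (s ≥ 0, L ≥ 1)
theorem snackNextEltLt (s L : Int) (hs : 0 ≤ s) (hL : 1 ≤ L) :
    PySem.Int.floordiv s (PySem.Int.floordiv s L + 1) < L := by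
  have hq0 : 0 ≤ PySem.Int.floordiv s L := by
    rw [PySem.Int.le_floordiv_iff_mul_le (by omega)]; simpa using hs
  have hsL : s < (PySem.Int.floordiv s L + 1) * L :=
    ((PySem.Int.floordiv_eq_iff_of_pos (by omega)).mp rfl).2
  rw [PySem.Int.floordiv_lt_iff_lt_mul (by omega)]
  nlinarith

-- inside the block (s//(s//L+1), L] the quotient s//· is constant
theorem snackBlockEq (s L L'' : Int) (hs : 0 ≤ s) (h1 : 1 ≤ L'') (h2 : L'' ≤ L)
    (hgt : PySem.Int.floordiv s (PySem.Int.floordiv s L + 1) < L'') :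
    PySem.Int.floordiv s L'' = PySem.Int.floordiv s L := by
  have hq0 : 0 ≤ PySem.Int.floordiv s L := by
    rw [PySem.Int.le_floordiv_iff_mul_le (by omega)]; simpa using hs
  have hlo : PySem.Int.floordiv s L ≤ PySem.Int.floordiv s L'' :=
    snackFdivAntitone s L'' L hs h1 h2
  have hs' : s < L'' * (PySem.Int.floordiv s L + 1) := by
    rwa [PySem.Int.floordiv_lt_iff_lt_mul (by omega)] at hgt
  have hhi : PySem.Int.floordiv s L'' < PySem.Int.floordiv s L + 1 := by
    rw [PySem.Int.floordiv_lt_iff_lt_mul (by omega)]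
    nlinarith
  omega

-- snackNext: strictly below L and an upper bound for every per-element jump target
theorem snackNext_spec (snack : List Int) (hne : snack ≠ [])
    (hpos : ∀ s ∈ snack, 0 ≤ s) (L : Int) (hL : 1 ≤ L) :
    snackNext snack L < L ∧
    ∀ s ∈ snack, PySem.Int.floordiv s (PySem.Int.floordiv s L + 1) ≤ snackNext snack L := by
  unfold snackNext
  cases hm : PySem.List.max?
      (snack.map (fun s => PySem.Int.floordiv s (PySem.Int.floordiv s L + 1)))
      (fun y => y) with
  | none =>
    rw [PySem.List.max?_eq_none_iff, List.map_eq_nil_iff] at hm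
    exact absurd hm hne
  | some v =>
    have hvmem := PySem.List.max?_mem hm
    obtain ⟨s0, hs0, hv⟩ := List.mem_map.mp hvmem
    have hmax := PySem.List.max?_isMax hm
    refine ⟨?_, fun s hs => hmax _ (List.mem_map.mpr ⟨s, hs, rfl⟩)⟩
    rw [← hv]
    exact snackNextEltLt s0 L (hpos s0 hs0) hL

-- the skip scan returns the largest feasible L' ≤ mx (or 0 if none), given that
-- everything in (L, mx] is already known infeasible
theorem snackSkip_spec (m : Int) (snack : List Int) (hne : snack ≠ [])
    (hpos : ∀ s ∈ snack, 0 ≤ s) (mx : Int) (hmx0 : 0 ≤ mx) :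
    ∀ n : Nat, ∀ L : Int, L.toNat = n → L ≤ mx →
      (∀ L', L < L' → L' ≤ mx → 1 ≤ L' → ¬ snackTotal snack L' ≥ m) →
      0 ≤ snackSkip m snack L ∧
      snackSkip m snack L ≤ mx ∧
      (1 ≤ snackSkip m snack L → snackTotal snack (snackSkip m snack L) ≥ m) ∧
      (∀ L', 1 ≤ L' → L' ≤ mx → snackTotal snack L' ≥ m → L' ≤ snackSkip m snack L) := by
  intro n
  induction n using Nat.strong_induction_on with
  | _ n ih
  intro L hn hLmx hinv
  by_cases h : L ≥ 1
  · by_cases hf : (snack.map (fun s => PySem.Int.floordiv s L)).sum ≥ m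
    · rw [snackSkip, dif_pos h, if_pos hf]
      refine ⟨by omega, hLmx, fun _ => hf, fun L' h1 h2 hfe => ?_⟩
      by_contra hgt
      exact hinv L' (by omega) h2 h1 hfe
    · obtain ⟨hlt, hub⟩ := snackNext_spec snack hne hpos L h
      rw [snackSkip, dif_pos h, if_neg hf, dif_pos hlt]
      refine ih (snackNext snack L).toNat (by omega) _ rfl (by omega) ?_
      intro L' hL' hL'mx h1'
      by_cases hcase : L < L'
      · exact hinv L' hcase hL'mx h1'
      · -- snackNext snack L < L' ≤ L: the sum is unchanged from L
        have : snackTotal snack L' = snackTotal snack L := by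
          unfold snackTotal
          congr 1
          refine List.map_congr_left (fun s hs => ?_)
          exact snackBlockEq s L L' (hpos s hs) h1' (by omega) (by
            have := hub s hs; omega)
        unfold snackTotal at this ⊢
        omega
  · rw [snackSkip, dif_neg h]
    refine ⟨le_rfl, hmx0, by omega, fun L' h1 h2 hfe => ?_⟩
    exact absurd hfe (hinv L' (by omega) h2 h1)

-- binary-search invariant: goA computes any value r that is maximal-feasible
theorem snackGoA_eq (m : Int) (snack : List Int) (hpos : ∀ s ∈ snack, 0 ≤ s)
    (mx r : Int) (hr0 : 0 ≤ r) (hrmx : r ≤ mx)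
    (hrf : 1 ≤ r → snackTotal snack r ≥ m)
    (hrmax : ∀ L, 1 ≤ L → L ≤ mx → snackTotal snack L ≥ m → L ≤ r) :
    ∀ start stop res, 1 ≤ start → stop ≤ mx →
      res = min r (start - 1) →
      (r ≤ stop ∨ r ≤ start - 1) →
      snackGoA m snack start stop res = r := by
  have char : ∀ L, 1 ≤ L → L ≤ mx → (snackTotal snack L ≥ m ↔ L ≤ r) := by
    intro L h1 h2
    constructor
    · exact hrmax L h1 h2
    · intro hle
      have hfr := hrf (by omega)
      have := snackTotalAntitone snack hpos L r h1 hle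
      omega
  have main : ∀ n : Nat, ∀ start stop res : Int, (stop - start + 1).toNat = n →
      1 ≤ start → stop ≤ mx →
      res = min r (start - 1) →
      (r ≤ stop ∨ r ≤ start - 1) →
      snackGoA m snack start stop res = r := by
    intro n
    induction n using Nat.strong_induction_on with
    | _ n ih =>
      intro start stop res hn h1 h2 hres hdisj
      by_cases h : start ≤ stop
      · have hmid := PySem.Int.floordiv_two_mid_bounds (lo := start) (hi := stop) h
        set mid := PySem.Int.floordiv (start + stop) 2 with hmiddef
        by_cases hfeas : snackTotal snack mid ≥ m
        · have hmle : mid ≤ r := (char mid (by omega) (by omega)).mp hfeas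
          rw [snackGoA, dif_pos h, ← hmiddef, if_pos hfeas]
          exact ih (stop - (mid + 1) + 1).toNat (by omega) (mid + 1) stop mid rfl
            (by omega) h2 (by omega) (by omega)
        · have hm : ¬ mid ≤ r := fun hle =>
            hfeas ((char mid (by omega) (by omega)).mpr hle)
          rw [snackGoA, dif_pos h, ← hmiddef, if_neg hfeas]
          exact ih (mid - 1 - start + 1).toNat (by omega) start (mid - 1) res rfl
            h1 (by omega) hres (by omega)
      · rw [snackGoA, dif_neg h]
        omega
  intro start stop res
  exact main (stop - start + 1).toNat start stop res rfl

-- ===== VERDICT (by name: the statement is the Claim_ definition above) =====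
theorem snack_length_spec : Claim_equal_snack_length := by
  intro m snack _ hpre
  obtain ⟨hne, hsign⟩ := hpre
  unfold Spec_snack_length snack_length snack_length_alt
  cases hmx : PySem.List.max? snack (fun y => y) with
  | none => rfl
  | some mx =>
    dsimp only
    have hmem : mx ∈ snack := PySem.List.max?_mem hmx
    cases hsign with
    | inl hpos =>
      have hmx0 : 0 ≤ mx := hpos mx hmem
      obtain ⟨h0, hmax, hfa, hbound⟩ :=
        snackSkip_spec m snack hne hpos mx hmx0 mx.toNat mx rfl le_rfl
          (fun L' h1 h2 _ => by omega)
      exact snackGoA_eq m snack hpos mx _ h0 hmax hfa hbound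
        1 mx 0 le_rfl le_rfl (by omega) (by omega)
    | inr hneg =>
      have hmx0 : mx ≤ 0 := hneg mx hmem
      rw [snackSkip, dif_neg (by omega), snackGoA, dif_neg (by omega)]
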